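-- pv_equiv track=rewrite | github.com/crsprunger/arcraiders-calculator | flask_app.py | get_previous_upgrade_level
-- ===== SOURCE A (Python) =====
-- def get_previous_upgrade_level(item_id):
--     """Get the previous upgrade level for a weapon (e.g., renegade_iii -> renegade_ii)."""
--     # Map of current level suffix to previous level
--     upgrade_map = {
--         '_iv': '_iii',
--         '_iii': '_ii',
--         '_ii': '_i'
--     }
--
--     for current, previous in upgrade_map.items():
--         if item_id.endswith(current):
--             return item_id[:-len(current)] + previous
--
--     return None
-- ===== SOURCE B (Python) =====
-- def get_previous_upgrade_level(item_id):
--     """Get the previous upgrade level for a weapon (e.g., renegade_iii -> renegade_ii)."""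
--     prefix, sep, suffix = item_id.rpartition('_')
--     mapped = {'iv': 'iii', 'iii': 'ii', 'ii': 'i'}.get(suffix)
--     if sep and mapped is not None:
--         return prefix + '_' + mapped
--     return None
-- ===== Notes on version B (the rewrite author's own statement) =====
-- stated objective: idiomatic
-- what changed: Replaces A's loop over suffix/replacement pairs with endswith tests and negative-index slicing by a single rpartition('_') at the last underscore plus one lookup of the bare numeral in a dict, rebuilding the result as prefix + '_' + mapped.
import Mathlib
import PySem

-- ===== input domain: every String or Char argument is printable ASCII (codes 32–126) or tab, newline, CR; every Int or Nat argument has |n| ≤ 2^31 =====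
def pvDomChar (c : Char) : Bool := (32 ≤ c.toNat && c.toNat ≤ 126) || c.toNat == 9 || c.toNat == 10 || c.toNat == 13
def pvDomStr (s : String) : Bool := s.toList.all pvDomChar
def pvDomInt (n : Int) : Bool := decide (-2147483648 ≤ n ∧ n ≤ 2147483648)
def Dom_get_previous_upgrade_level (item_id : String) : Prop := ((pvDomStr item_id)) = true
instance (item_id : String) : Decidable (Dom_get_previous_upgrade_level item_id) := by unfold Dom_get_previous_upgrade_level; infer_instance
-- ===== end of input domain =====

-- B replaces A's suffix-scanning loop by one rpartition at the last underscore plus a dict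
-- lookup of the bare numeral (idiomatic decomposition; same cost).

-- ===== PORT A =====
def gpulA_loop (item_id : String) : List (String × String) → Option String
  | [] => none
  | (current, previous) :: rest =>
    if PySem.Str.endswith item_id current then
      some (PySem.Str.slice item_id none (some (-(PySem.Str.len current))) ++ previous)
    else gpulA_loop item_id rest

def get_previous_upgrade_level (item_id : String) : Option String :=
  gpulA_loop item_id [("_iv", "_iii"), ("_iii", "_ii"), ("_ii", "_i")]

-- ===== PORT B =====
-- str.rpartition('_') ported by hand (PySem has no rpartition): split at the LAST
-- occurrence of '_' by scanning the reversed character list; ('', '', s) when absent — exact.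
def pyRPartitionUnderscore (s : String) : String × String × String :=
  let r := s.toList.reverse
  let suf := r.takeWhile (· != '_')
  if suf.length = r.length then ("", "", s)
  else (String.ofList ((r.drop (suf.length + 1)).reverse), "_", String.ofList suf.reverse)

def get_previous_upgrade_level_alt (item_id : String) : Option String :=
  let p := pyRPartitionUnderscore item_id
  let romanMap : PySem.Dict String String := PySem.Dict.ofList [("iv", "iii"), ("iii", "ii"), ("ii", "i")]
  match PySem.Dict.get? romanMap p.2.2 with
  | some mapped => if p.2.1 ≠ "" then some (p.1 ++ "_" ++ mapped) else none
  | none => none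

-- ===== PRECONDITION & SPEC =====
def Spec_get_previous_upgrade_level (item_id : String) (out : Option String) : Prop := out = get_previous_upgrade_level_alt item_id
instance (item_id : String) (out : Option String) : Decidable (Spec_get_previous_upgrade_level item_id out) := by unfold Spec_get_previous_upgrade_level; infer_instance

-- ===== CLAIM (what is proved, stated in full; the proofs are below) =====
def Claim_equal_get_previous_upgrade_level : Prop := ∀ (item_id : String), Dom_get_previous_upgrade_level item_id → Spec_get_previous_upgrade_level item_id (get_previous_upgrade_level item_id)

-- ===== LEMMAS AND PROOFS =====

lemma gpul_dropWhile_head_false {α : Type} (p : α → Bool) :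
    ∀ (l : List α) (x : α) (xs : List α), l.dropWhile p = x :: xs → p x = false := by
  intro l
  induction l with
  | nil => intro x xs h; simp [List.dropWhile] at h
  | cons a l ih =>
    intro x xs h
    by_cases hp : p a
    · rw [List.dropWhile_cons_of_pos hp] at h; exact ih _ _ h
    · rw [List.dropWhile_cons_of_neg hp] at h
      cases h; simpa using hp

lemma gpul_takeWhile_eq (q t : List Char) (hq : ∀ c ∈ q, (c != '_') = true) :
    (q ++ '_' :: t).takeWhile (· != '_') = q := by
  induction q with
  | nil => simp
  | cons a q ih =>
    have ha := hq a (by simp)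
    simp only [List.cons_append, List.takeWhile_cons, ha]
    simp [ih (fun c hc => hq c (by simp [hc]))]

lemma gpul_endswith_iff (r : List Char) (pat : String) :
    PySem.Str.endswith (String.ofList r.reverse) pat = true ↔ pat.toList.reverse <+: r := by
  rw [PySem.Str.endswith_eq, PySem.Chars.endswith_iff, String.toList_ofList,
    ← List.reverse_prefix, List.reverse_reverse]

lemma gpul_prefix_eq (q pat t u : List Char) (hq : ∀ c ∈ q, (c != '_') = true)
    (hpat : ∀ c ∈ pat, (c != '_') = true)
    (hu : (pat ++ ['_']) ++ u = q ++ '_' :: t) : q = pat := by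
  have h := congrArg (List.takeWhile (· != '_')) hu
  rw [gpul_takeWhile_eq q t hq] at h
  rw [show (pat ++ ['_']) ++ u = pat ++ '_' :: u by simp] at h
  rw [gpul_takeWhile_eq pat u hpat] at h
  exact h.symm

-- endswith is false when q (the underscore-free tail) is not the pattern's numeral
lemma gpul_endswith_false (q t : List Char) (patq : List Char) (pat : String)
    (hq : ∀ c ∈ q, (c != '_') = true) (hpat : ∀ c ∈ patq, (c != '_') = true)
    (hrev : pat.toList.reverse = patq ++ ['_']) (hne : q ≠ patq) :
    PySem.Str.endswith (String.ofList (q ++ '_' :: t).reverse) pat = false := by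
  rw [← Bool.not_eq_true, gpul_endswith_iff, hrev]
  rintro ⟨u, hu⟩
  exact hne (gpul_prefix_eq q patq t u hq hpat hu)

lemma gpul_key (r : List Char) :
    get_previous_upgrade_level (String.ofList r.reverse) = get_previous_upgrade_level_alt (String.ofList r.reverse) := by
  cases hrest : r.dropWhile (· != '_') with
  | nil =>
    have hr : r.takeWhile (· != '_') = r := by
      conv_rhs => rw [← List.takeWhile_append_dropWhile (p := (· != '_')) (l := r)]
      rw [hrest]; simp
    have hmem : ∀ c ∈ r, c ≠ '_' := by
      intro c hc
      rw [← hr] at hc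
      simpa using List.mem_takeWhile_imp (p := (· != '_')) hc
    have hnp : ∀ pat : List Char, '_' ∈ pat → PySem.Chars.endswith r.reverse pat = false := by
      intro pat hin
      rw [← Bool.not_eq_true, PySem.Chars.endswith_iff]
      rintro ⟨u, hu⟩
      refine hmem '_' ?_ rfl
      rw [← List.mem_reverse, ← hu]
      exact List.mem_append_right _ hin
    have hA : get_previous_upgrade_level (String.ofList r.reverse) = none := by
      simp [get_previous_upgrade_level, gpulA_loop,
        hnp ['_','i','v'] (by decide), hnp ['_','i','i','i'] (by decide), hnp ['_','i','i'] (by decide)]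
    have hB : get_previous_upgrade_level_alt (String.ofList r.reverse) = none := by
      cases hg : PySem.Dict.get? (PySem.Dict.ofList [("iv", "iii"), ("iii", "ii"), ("ii", "i")]) (String.ofList r.reverse) with
      | none => simp [get_previous_upgrade_level_alt, pyRPartitionUnderscore, hr, hg]
      | some v => simp [get_previous_upgrade_level_alt, pyRPartitionUnderscore, hr, hg]
    rw [hA, hB]
  | cons c t =>
    have hc : c = '_' := by
      have := gpul_dropWhile_head_false (· != '_') r c t hrest
      simpa using this
    subst hc
    obtain ⟨q, hq, hrq⟩ : ∃ q : List Char, (∀ c ∈ q, (c != '_') = true) ∧ r = q ++ '_' :: t :=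
      ⟨r.takeWhile (· != '_'), fun c hc => List.mem_takeWhile_imp (p := (· != '_')) hc, by
        conv_lhs => rw [← List.takeWhile_append_dropWhile (p := (· != '_')) (l := r)]
        rw [hrest]⟩
    subst hrq
    have htw := gpul_takeWhile_eq q t hq
    have hBsome : ∀ mapped : String,
        PySem.Dict.get? (PySem.Dict.ofList [("iv", "iii"), ("iii", "ii"), ("ii", "i")]) (String.ofList q.reverse) = some mapped →
        get_previous_upgrade_level_alt (String.ofList ((q ++ '_' :: t)).reverse)
          = some (String.ofList ((List.drop (q.length + 1) (q ++ '_' :: t)).reverse) ++ "_" ++ mapped) := by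
      intro mapped hg
      unfold get_previous_upgrade_level_alt pyRPartitionUnderscore
      simp only [String.toList_ofList, List.reverse_reverse, htw]
      rw [if_neg (by simp)]
      simp [hg]
    by_cases h1 : q = ['v', 'i']
    · subst h1
      have hA : get_previous_upgrade_level (String.ofList ((['v','i'] ++ '_' :: t)).reverse)
          = some (PySem.Str.slice (String.ofList ((['v','i'] ++ '_' :: t)).reverse) none (some (-(PySem.Str.len "_iv"))) ++ "_iii") := by
        simp only [get_previous_upgrade_level, gpulA_loop]
        rw [if_pos ((gpul_endswith_iff _ "_iv").2 ⟨t, by simp⟩)]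
      rw [hA, hBsome "iii" (by decide)]
      rw [Option.some.injEq, ← String.toList_inj]
      have hlen : -PySem.Str.len "_iv" = -(3 : Int) := by decide
      simp only [String.toList_append, PySem.Str.toList_slice, PySem.Chars.slice_eq_listSlice,
        String.toList_ofList, hlen]
      rw [PySem.List.slice_to_neg_ofNat _ 3 (by omega)]
      simp [List.take_left']
    · by_cases h2 : q = ['i', 'i', 'i']
      · subst h2
        have hA : get_previous_upgrade_level (String.ofList ((['i','i','i'] ++ '_' :: t)).reverse)
            = some (PySem.Str.slice (String.ofList ((['i','i','i'] ++ '_' :: t)).reverse) none (some (-(PySem.Str.len "_iii"))) ++ "_ii") := by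
          simp only [get_previous_upgrade_level, gpulA_loop]
          rw [gpul_endswith_false _ t ['v','i'] "_iv" hq (by simp) (by simp) (by decide)]
          simp only [Bool.false_eq_true, if_false]
          rw [if_pos ((gpul_endswith_iff _ "_iii").2 ⟨t, by simp⟩)]
        rw [hA, hBsome "ii" (by decide)]
        rw [Option.some.injEq, ← String.toList_inj]
        have hlen : -PySem.Str.len "_iii" = -(4 : Int) := by decide
        simp only [String.toList_append, PySem.Str.toList_slice, PySem.Chars.slice_eq_listSlice,
          String.toList_ofList, hlen]
        rw [PySem.List.slice_to_neg_ofNat _ 4 (by omega)]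
        simp [List.take_left']
      · by_cases h3 : q = ['i', 'i']
        · subst h3
          have hA : get_previous_upgrade_level (String.ofList ((['i','i'] ++ '_' :: t)).reverse)
              = some (PySem.Str.slice (String.ofList ((['i','i'] ++ '_' :: t)).reverse) none (some (-(PySem.Str.len "_ii"))) ++ "_i") := by
            simp only [get_previous_upgrade_level, gpulA_loop]
            rw [gpul_endswith_false _ t ['v','i'] "_iv" hq (by simp) (by simp) (by decide)]
            rw [gpul_endswith_false _ t ['i','i','i'] "_iii" hq (by simp) (by simp) (by decide)]
            simp only [Bool.false_eq_true, if_false]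
            rw [if_pos ((gpul_endswith_iff _ "_ii").2 ⟨t, by simp⟩)]
          rw [hA, hBsome "i" (by decide)]
          rw [Option.some.injEq, ← String.toList_inj]
          have hlen : -PySem.Str.len "_ii" = -(3 : Int) := by decide
          simp only [String.toList_append, PySem.Str.toList_slice, PySem.Chars.slice_eq_listSlice,
            String.toList_ofList, hlen]
          rw [PySem.List.slice_to_neg_ofNat _ 3 (by omega)]
          simp [List.take_left']
        · -- q matches no numeral: both sides return none
          have hA : get_previous_upgrade_level (String.ofList ((q ++ '_' :: t)).reverse) = none := by
            simp only [get_previous_upgrade_level, gpulA_loop]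
            rw [gpul_endswith_false _ t ['v','i'] "_iv" hq (by simp) (by simp) h1]
            rw [gpul_endswith_false _ t ['i','i','i'] "_iii" hq (by simp) (by simp) h2]
            rw [gpul_endswith_false _ t ['i','i'] "_ii" hq (by simp) (by simp) h3]
            simp
          have hkey : ∀ (lit : String) (litq : List Char), lit.toList = litq.reverse → q ≠ litq →
              (lit == String.ofList q.reverse) = false := by
            intro lit litq hlit hne
            refine beq_eq_false_iff_ne.2 (fun h => hne ?_)
            have h' := congrArg String.toList h
            rw [String.toList_ofList, hlit] at h'
            have := List.reverse_injective h'
            exact this.symm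
          have hB : get_previous_upgrade_level_alt (String.ofList ((q ++ '_' :: t)).reverse) = none := by
            unfold get_previous_upgrade_level_alt pyRPartitionUnderscore
            simp only [String.toList_ofList, List.reverse_reverse, htw]
            rw [if_neg (by simp)]
            have hofl : PySem.Dict.ofList [("iv", "iii"), ("iii", "ii"), ("ii", "i")]
                = (⟨[("iv", "iii"), ("iii", "ii"), ("ii", "i")]⟩ : PySem.Dict String String) := by decide
            simp [hofl, hkey "iv" ['v','i'] (by decide) h1,
              hkey "iii" ['i','i','i'] (by decide) h2,
              hkey "ii" ['i','i'] (by decide) h3, PySem.Dict.get?]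
          rw [hA, hB]

-- ===== VERDICT (by name: the statement is the Claim_ definition above) =====
theorem get_previous_upgrade_level_spec : Claim_equal_get_previous_upgrade_level := by
  intro item_id _
  unfold Spec_get_previous_upgrade_level
  have h := gpul_key item_id.toList.reverse
  rw [List.reverse_reverse, String.ofList_toList] at h
  exact h
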